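-- pv_equiv track=rewrite | github.com/yee12300/BaekJoon-Problem-Solving | 3. Gold/Gold 5/1011.py | min_hop2
-- ===== SOURCE A (Python) =====
-- def min_hop2(distance):
--     if distance == 0:
--         return 0
--     hops = [1]
--     total = sum(hops)
--     while not (total == distance and hops[-1] == 1):
--         if total < distance:
--             hops.append(hops[-1] + 1)
--         else:
--             while hops[-2] - 1 == hops[-1]:
--                 hops.pop()
--             hops[-1] -= 1
--
--         total = sum(hops)
--
--     return len(hops)
-- ===== SOURCE B (Python) =====
-- def min_hop2(distance):
--     if distance == 0:
--         return 0
--     k = 1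
--     while (k + 1) * (k + 1) <= distance:
--         k += 1
--     if distance == k * k:
--         return 2 * k - 1
--     if distance <= k * k + k:
--         return 2 * k
--     return 2 * k + 1
-- ===== Notes on version B (the rewrite author's own statement) =====
-- stated objective: faster
-- what changed: A simulates the whole hop list (append/decrement/pop, resumming it every iteration) until it happens upon a valid plan; B computes floor(sqrt(distance)) with a simple counting loop and returns 2k-1, 2k or 2k+1 by the closed-form triangle-number cases.
import Mathlib
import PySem

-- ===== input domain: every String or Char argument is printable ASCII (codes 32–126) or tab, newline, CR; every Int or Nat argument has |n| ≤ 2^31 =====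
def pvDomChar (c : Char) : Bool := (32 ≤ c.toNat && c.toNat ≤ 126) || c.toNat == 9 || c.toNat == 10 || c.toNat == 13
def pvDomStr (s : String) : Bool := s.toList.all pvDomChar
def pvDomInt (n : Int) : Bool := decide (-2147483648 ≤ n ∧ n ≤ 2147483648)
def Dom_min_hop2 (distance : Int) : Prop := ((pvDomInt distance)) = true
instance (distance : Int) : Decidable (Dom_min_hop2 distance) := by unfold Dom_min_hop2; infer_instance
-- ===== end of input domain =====

-- B replaces A's O(d^1.5)-ish simulation of the hop list by a closed form driven by an
-- integer-square-root loop (objective: faster, asymptotic).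

-- ===== PORT A =====
-- A's state `hops` is kept as a Lean list in REVERSED order: Python's append/pop/last-element
-- operations at the right end become cons/tail/head here; the returned length is unchanged.
-- A's `while` loop is made total with a fuel counter large enough to cover every admitted
-- input (proved below via a strictly increasing radix-4 measure); fuel never runs out on
-- inputs satisfying Pre_, so the guard only makes the same computation total.

-- Python's inner `while hops[-2]-1 == hops[-1]: hops.pop()`
def popLoop (l : List Int) : List Int :=
  match l with
  | a :: b :: r => if b - 1 = a then popLoop (b :: r) else a :: b :: r
  | l => l

-- Python's `hops[-1] -= 1`
def decHead (l : List Int) : List Int :=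
  match l with
  | a :: r => (a - 1) :: r
  | [] => []

def loopAF (d : Int) : Nat → List Int → Int
  | 0, _ => 0
  | f + 1, l =>
    if l.sum = d ∧ l.headI = 1 then (l.length : Int)
    else if l.sum < d then loopAF d f ((l.headI + 1) :: l)
    else loopAF d f (decHead (popLoop l))

def min_hop2 (distance : Int) : Int :=
  if distance = 0 then 0
  else if 1 ≤ distance then loopAF distance (4 ^ (distance.toNat + 1)) [1]
  else 0  -- for distance < 0 the Python loop never terminates (outside Pre_); value irrelevant

-- ===== PORT B =====
-- Source B's `while (k+1)*(k+1) <= distance: k += 1`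
def isq (d k : Int) : Int :=
  if h : (k + 1) * (k + 1) ≤ d then isq d (k + 1) else k
termination_by (d - k).toNat
decreasing_by
  have h1 : k + 1 ≤ (k + 1) * (k + 1) := by
    have h0 := Int.le_self_sq (k + 1)
    rwa [sq] at h0
  have h2 : k + 1 ≤ d := h1.trans h
  omega

def min_hop2_alt (distance : Int) : Int :=
  if distance = 0 then 0
  else
    let k := isq distance 1
    if distance = k * k then 2 * k - 1
    else if distance ≤ k * k + k then 2 * k
    else 2 * k + 1

-- ===== PRECONDITION & SPEC =====
-- Pre_ excludes distance < 0, on which the Python A loops forever (it never returns).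
def Pre_min_hop2 (distance : Int) : Prop := 0 ≤ distance
instance (distance : Int) : Decidable (Pre_min_hop2 distance) := by unfold Pre_min_hop2; infer_instance
def pvWitness_min_hop2 : Int := (7)

def Spec_min_hop2 (distance : Int) (out : Int) : Prop := out = min_hop2_alt distance
instance (distance : Int) (out : Int) : Decidable (Spec_min_hop2 distance out) := by unfold Spec_min_hop2; infer_instance

-- ===== CLAIM (what is proved, stated in full; the proofs are below) =====
def Claim_equal_min_hop2 : Prop := ∀ (distance : Int), Dom_min_hop2 distance → Pre_min_hop2 distance → Spec_min_hop2 distance (min_hop2 distance)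

-- ===== LEMMAS AND PROOFS =====

-- tri v = 1 + 2 + ... + v (0 for v ≤ 0)
def tri (v : Int) : Int :=
  if v ≤ 0 then 0 else v + tri (v - 1)
termination_by v.toNat
decreasing_by omega

-- loop invariants (l is the reversed hop list)
def Pos (l : List Int) : Prop := ∀ x ∈ l, 1 ≤ x

def Steps : List Int → Prop
  | a :: b :: r => (b - 1 ≤ a ∧ a ≤ b + 1) ∧ Steps (b :: r)
  | _ => True

-- pruning evidence: whenever the hop profile makes a non-increasing step (x after y reading the
-- Python list right-to-left), the sum of the part before it plus tri (x+1) exceeds d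
def RP (d : Int) : List Int → Prop
  | x :: y :: r => (x ≤ y → d < (y :: r).sum + tri (x + 1)) ∧ RP d (y :: r)
  | _ => True

def InvA (d : Int) (l : List Int) : Prop :=
  l ≠ [] ∧ l.getLast? = some 1 ∧ Pos l ∧ Steps l ∧ RP d l ∧ l.sum ≤ d + l.headI - 1

-- termination measure: radix-4 encoding of the step profile; it strictly grows every iteration
def encP : List Int → Nat
  | x :: y :: r => (y + 2 - x).toNat + 4 * encP (y :: r)
  | _ => 0

def mu (d : Int) (l : List Int) : Nat := 4 ^ (d + 1 - l.length).toNat * encP l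

def meas (d : Int) (l : List Int) : Nat := 4 ^ (d.toNat + 1) - mu d l

lemma tri_zero_of_nonpos (v : Int) (h : v ≤ 0) : tri v = 0 := by
  rw [tri]; simp [h]

lemma tri_succ (v : Int) (h : 1 ≤ v) : tri v = v + tri (v - 1) := by
  rw [tri]; simp [show ¬ v ≤ 0 by omega]

lemma tri_nonneg (v : Int) : 0 ≤ tri v := by
  induction v using Int.induction_on with
  | zero => simp [tri_zero_of_nonpos]
  | succ n ih =>
    rw [tri_succ ((n : Int) + 1) (by omega)]
    have h : ((n : Int) + 1 - 1) = (n : Int) := by ring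
    rw [h]; omega
  | pred n ih => rw [tri_zero_of_nonpos] <;> omega

lemma tri_one_le (v : Int) (h : 1 ≤ v) : 1 ≤ tri v := by
  rw [tri_succ v h]; have := tri_nonneg (v - 1); omega

lemma getLast?_cons_ne {x : Int} {l : List Int} (h : l ≠ []) :
    (x :: l).getLast? = l.getLast? := by
  cases l with
  | nil => exact absurd rfl h
  | cons b t => simp [List.getLast?_cons_cons]

lemma inv_init (d : Int) (h : 1  ≤ d) : InvA d [1] := by
  refine ⟨by simp, by simp, ?_, ?_, ?_, ?_⟩ <;> simp [Pos, Steps, RP, List.headI] <;> omega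

lemma inv_append (d : Int) (l : List Int) (hinv : InvA d l) (hlt : l.sum < d) :
    InvA d ((l.headI + 1) :: l) := by
  obtain ⟨hne, hlast, hpos, hsteps, hrp, hsum⟩ := hinv
  match l with
  | a :: r =>
    simp only [List.headI] at *
    refine ⟨by simp, ?_, ?_, ?_, ?_, ?_⟩
    · rw [getLast?_cons_ne (by simp)]; exact hlast
    · intro x hx
      rcases List.mem_cons.1 hx with h1 | h2
      · have := hpos a (by simp); omega
      · exact hpos x h2
    · exact ⟨⟨by omega, by omega⟩, hsteps⟩
    · exact ⟨by omega, hrp⟩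
    · simp only [List.headI, List.sum_cons] at *; omega

lemma popdec_aux (d : Int) : ∀ (r : List Int) (a : Int),
    Pos (a :: r) → Steps (a :: r) → RP d (a :: r) → (a :: r).getLast? = some 1 → 2 ≤ a →
    d + 1 ≤ (a :: r).sum + tri (a - 1) → (a :: r).sum ≤ d + a - 1 →
    InvA d (decHead (popLoop (a :: r))) := by
  intro r
  induction r with
  | nil =>
    intro a _ _ _ hlast ha _ _
    simp at hlast; omega
  | cons b r' ih =>
    intro a hpos hsteps hrp hlast ha hp1 hp2
    by_cases hpop : b - 1 = a
    · -- Python pops; recurse on (b :: r')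
      have hrec : popLoop (a :: b :: r') = popLoop (b :: r') := by
        rw [popLoop]; simp [hpop]
      rw [hrec]
      have hb : b = a + 1 := by omega
      refine ih b ?_ ?_ ?_ ?_ (by omega) ?_ ?_
      · intro x hx; exact hpos x (List.mem_cons_of_mem a hx)
      · exact hsteps.2
      · exact hrp.2
      · rw [← getLast?_cons_ne (x := a) (by simp)]; exact hlast
      · -- d + 1 ≤ (b :: r').sum + tri (b - 1)
        have h1 : tri (b - 1) = (b - 1) + tri (b - 2) := by
          have := tri_succ (b - 1) (by omega)
          rw [show b - 1 - 1 = b - 2 by ring] at this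
          exact this
        have h2 : tri (a - 1) = tri (b - 2) := by
          have hh : b - 2 = a - 1 := by omega
          rw [hh]
        simp only [List.sum_cons] at hp1 ⊢
        rw [h1, ← h2]
        linarith
      · simp only [List.sum_cons] at hp2 ⊢; omega
    · -- no pop: decrement the head
      have hrec : popLoop (a :: b :: r') = a :: b :: r' := by
        rw [popLoop]; simp [hpop]
      rw [hrec]
      simp only [decHead]
      have hab : b - 1 ≤ a ∧ a ≤ b + 1 := hsteps.1
      have htr : tri a = a + tri (a - 1) := tri_succ a (by omega)
      refine ⟨by simp, ?_, ?_, ?_, ?_, ?_⟩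
      · rw [getLast?_cons_ne (by simp)]
        rw [← getLast?_cons_ne (x := a) (by simp)]; exact hlast
      · intro x hx
        rcases List.mem_cons.1 hx with h1 | h2
        · omega
        · exact hpos x (by simp [List.mem_cons] at h2 ⊢; tauto)
      · exact ⟨⟨by omega, by omega⟩, hsteps.2⟩
      · refine ⟨?_, hrp.2⟩
        intro _
        have : a - 1 + 1 = a := by ring
        rw [this]
        simp only [List.sum_cons] at hp1 ⊢
        omega
      · simp only [List.headI, List.sum_cons] at hp2 ⊢; omega

lemma head_ge_two (d : Int) (l : List Int) (hinv : InvA d l) (hge : d ≤ l.sum)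
    (hng : ¬(l.sum = d ∧ l.headI = 1)) : 2 ≤ l.headI := by
  obtain ⟨hne, hlast, hpos, hsteps, hrp, hsum⟩ := hinv
  match l with
  | a :: r =>
    simp only [List.headI] at *
    have h1 : 1 ≤ a := hpos a (by simp)
    by_contra hlt
    have ha : a = 1 := by omega
    subst ha
    omega

lemma inv_popdec (d : Int) (l : List Int) (hinv : InvA d l) (hge : d ≤ l.sum)
    (hng : ¬(l.sum = d ∧ l.headI = 1)) : InvA d (decHead (popLoop l)) := by
  have ha2 := head_ge_two d l hinv hge hng
  obtain ⟨hne, hlast, hpos, hsteps, hrp, hsum⟩ := hinv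
  match l with
  | a :: r =>
    simp only [List.headI] at *
    refine popdec_aux d r a hpos hsteps hrp hlast ha2 ?_ hsum
    have := tri_one_le (a - 1) (by omega)
    omega

lemma sum_ge_len (l : List Int) (hpos : Pos l) (hne : l ≠ []) :
    l.headI + ((l.length : Int) - 1) ≤ l.sum := by
  induction l with
  | nil => exact absurd rfl hne
  | cons a r ih =>
    cases r with
    | nil => simp
    | cons b r' =>
      have hb : 1 ≤ b := hpos b (by simp)
      have := ih (fun x hx => hpos x (by simp [List.mem_cons] at hx ⊢; tauto)) (by simp)
      simp only [List.headI, List.sum_cons, List.length_cons] at *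
      push_cast at *
      omega

lemma invA_len (d : Int) (l : List Int) (hinv : InvA d l) :
    1 ≤ (l.length : Int) ∧ (l.length : Int) ≤ d := by
  obtain ⟨hne, hlast, hpos, hsteps, hrp, hsum⟩ := hinv
  have h1 := sum_ge_len l hpos hne
  have h2 : 1 ≤ l.length := by
    cases l with | nil => exact absurd rfl hne | cons a r => simp
  constructor
  · exact_mod_cast h2
  · omega

lemma encP_lt (l : List Int) (hsteps : Steps l) : encP l < 4 ^ (l.length - 1) := by
  induction l with
  | nil => simp [encP]
  | cons a r ih =>
    cases r with
    | nil => simp [encP]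
    | cons b r' =>
      have hw : (b + 2 - a).toNat ≤ 3 := by
        have := hsteps.1; omega
      have := ih hsteps.2
      rw [encP]
      simp only [List.length_cons] at *
      have h4 : encP (b :: r') < 4 ^ r'.length := by simpa using this
      calc (b + 2 - a).toNat + 4 * encP (b :: r')
      _ ≤ 3 + 4 * (4 ^ r'.length - 1) := by omega
      _ < 4 ^ (r'.length + 1) := by
          have h5 : 1 ≤ 4 ^ r'.length := Nat.one_le_pow _ _ (by omega)
          have : 4 ^ (r'.length + 1) = 4 * 4 ^ r'.length := by ring
          omega

lemma mu_lt (d : Int) (l : List Int) (hinv : InvA d l) : mu d l < 4 ^ (d.toNat + 1) := by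
  obtain ⟨hL1, hLd⟩ := invA_len d l hinv
  have he : (d + 1 - l.length).toNat + (l.length - 1) = d.toNat := by omega
  have h1 := encP_lt l hinv.2.2.2.1
  unfold mu
  calc 4 ^ (d + 1 - (l.length : Int)).toNat * encP l
  _ < 4 ^ (d + 1 - (l.length : Int)).toNat * 4 ^ (l.length - 1) := by
      exact mul_lt_mul_of_pos_left h1 (pow_pos (by omega) _)
  _ = 4 ^ d.toNat := by rw [← pow_add, he]
  _ < 4 ^ (d.toNat + 1) := by
      apply Nat.pow_lt_pow_right (by omega) (by omega)

lemma meas_append_lt (d : Int) (l : List Int) (hinv : InvA d l) (hlt : l.sum < d) :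
    meas d ((l.headI + 1) :: l) < meas d l := by
  obtain ⟨hL1, hLd⟩ := invA_len d l hinv
  have hmul : mu d l < 4 ^ (d.toNat + 1) := mu_lt d l hinv
  have hstep : mu d ((l.headI + 1) :: l) = 4 ^ (d - (l.length : Int)).toNat + mu d l := by
    match l, hinv.1 with
    | a :: r, _ =>
      simp only [List.headI]
      unfold mu
      rw [encP]
      have h1 : (a + 2 - (a + 1)).toNat = 1 := by omega
      rw [h1]
      have e1 : (d + 1 - ((((a + 1) :: a :: r).length : Int))).toNat
          = (d - (((a :: r).length : Int))).toNat := by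
        simp only [List.length_cons]
        push_cast
        omega
      have e2 : (d - (((a :: r).length : Int))).toNat + 1
          = (d + 1 - (((a :: r).length : Int))).toNat := by
        omega
      rw [e1]
      rw [Nat.mul_add]
      congr 1
      · omega
      · rw [← e2, pow_succ]; ring
  have hone : 1 ≤ 4 ^ (d - (l.length : Int)).toNat := Nat.one_le_pow _ _ (by omega)
  unfold meas
  omega

lemma mu_popdec_ge (d : Int) : ∀ (r : List Int) (a : Int),
    Pos (a :: r) → Steps (a :: r) → (a :: r).getLast? = some 1 → 2 ≤ a →
    ((a :: r).length : Int) ≤ d →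
    mu d (a :: r) + 4 ^ ((d + 1 - ((a :: r).length : Int)).toNat) ≤ mu d (decHead (popLoop (a :: r))) := by
  intro r
  induction r with
  | nil =>
    intro a _ _ hlast ha _
    simp at hlast; omega
  | cons b r' ih =>
    intro a hpos hsteps hlast ha hLd
    have hb1 : 1 ≤ b := hpos b (by simp)
    have hstep : b - 1 ≤ a ∧ a ≤ b + 1 := hsteps.1
    have hlen : ((a :: b :: r').length : Int) = (r'.length : Int) + 2 := by
      simp only [List.length_cons]; push_cast; ring
    have hlen2 : ((b :: r').length : Int) = (r'.length : Int) + 1 := by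
      simp only [List.length_cons]; push_cast; ring
    have e2 : (d + 1 - ((r'.length : Int) + 2)).toNat + 1
        = (d + 1 - ((r'.length : Int) + 1)).toNat := by
      rw [hlen] at hLd; omega
    by_cases hpop : b - 1 = a
    · have hrec : popLoop (a :: b :: r') = popLoop (b :: r') := by
        rw [popLoop]; simp [hpop]
      rw [hrec]
      have hw3 : (b + 2 - a).toNat = 3 := by omega
      have key1 : mu d (a :: b :: r')
          = 3 * 4 ^ ((d + 1 - ((r'.length : Int) + 2)).toNat) + mu d (b :: r') := by
        unfold mu
        rw [encP, hw3, hlen, hlen2, ← e2, pow_succ]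
        ring
      have hih := ih b (fun x hx => hpos x (List.mem_cons_of_mem a hx)) hsteps.2
        (by rw [← getLast?_cons_ne (x := a) (by simp)]; exact hlast) (by omega)
        (by rw [hlen] at hLd; rw [hlen2]; omega)
      rw [hlen2, ← e2, pow_succ] at hih
      rw [key1, hlen]
      omega
    · have hrec : popLoop (a :: b :: r') = a :: b :: r' := by
        rw [popLoop]; simp [hpop]
      rw [hrec]
      simp only [decHead]
      have hw : (b + 2 - (a - 1)).toNat = (b + 2 - a).toNat + 1 := by omega
      have hlen3 : (((a - 1) :: b :: r').length : Int) = (r'.length : Int) + 2 := by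
        simp only [List.length_cons]; push_cast; ring
      apply le_of_eq
      unfold mu
      rw [encP, encP, hw, hlen, hlen3]
      ring

lemma meas_popdec_lt (d : Int) (l : List Int) (hinv : InvA d l) (hge : d ≤ l.sum)
    (hng : ¬(l.sum = d ∧ l.headI = 1)) : meas d (decHead (popLoop l)) < meas d l := by
  have ha2 := head_ge_two d l hinv hge hng
  have hmul : mu d l < 4 ^ (d.toNat + 1) := mu_lt d l hinv
  obtain ⟨hL1, hLd⟩ := invA_len d l hinv
  obtain ⟨hne, hlast, hpos, hsteps, hrp, hsum⟩ := hinv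
  match l, hne with
  | a :: r, _ =>
    simp only [List.headI] at ha2
    have h := mu_popdec_ge d r a hpos hsteps hlast ha2 hLd
    have hp : 1 ≤ 4 ^ ((d + 1 - (((a :: r).length : Int))).toNat) := Nat.one_le_pow _ _ (by omega)
    unfold meas
    omega

-- M L = greatest distance coverable by L hops that start and end at 1 (recursion M L = tri L - M (L-1))
def Mfn (x : Int) : Int :=
  if x ≤ 0 then 0 else tri x - Mfn (x - 1)
termination_by x.toNat
decreasing_by omega

-- basic facts about Mfn
lemma Mfn_nonpos (x : Int) (h : x ≤ 0) : Mfn x = 0 := by rw [Mfn]; simp [h]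

lemma Mfn_succ (x : Int) (h : 1 ≤ x) : Mfn x = tri x - Mfn (x - 1) := by
  rw [Mfn]; simp [show ¬ x ≤ 0 by omega]

lemma Mfn_bounds : ∀ x : Int, 0 ≤ Mfn x ∧ Mfn x ≤ tri x := by
  intro v
  induction v using Int.induction_on with
  | zero => simp [Mfn_nonpos, tri_zero_of_nonpos]
  | succ n ih =>
    rw [Mfn_succ ((n : Int) + 1) (by omega)]
    rw [show ((n : Int) + 1 - 1) = (n : Int) by ring]
    have ht : tri ((n : Int) + 1) = ((n : Int) + 1) + tri (n : Int) := by
      rw [tri_succ ((n : Int) + 1) (by omega)]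
      rw [show ((n : Int) + 1 - 1) = (n : Int) by ring]
    omega
  | pred n ih =>
    rw [Mfn_nonpos _ (by omega)]
    have := tri_nonneg (-(n : Int) - 1)
    omega

lemma Mfn_add_prev (x : Int) (h : 0 ≤ x) : Mfn x + Mfn (x - 1) = tri x := by
  rcases eq_or_lt_of_le h with h0 | h1
  · rw [← h0]; simp [Mfn_nonpos, tri_zero_of_nonpos]
  · have := Mfn_succ x (by omega); omega

lemma Mfn_one : Mfn 1 = 1 := by
  rw [Mfn_succ 1 (by omega)]
  simp [Mfn_nonpos, tri_succ 1 (by omega), tri_zero_of_nonpos]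

lemma Mfn_step (x : Int) (h : 0 ≤ x) :
    0 ≤ Mfn (x + 1) - Mfn x ∧ Mfn (x + 1) - Mfn x ≤ x + 1 := by
  induction x, h using Int.le_induction with
  | base =>
    have h1 : Mfn (0 + 1) = 1 := by norm_num [Mfn_one]
    have h0 : Mfn 0 = 0 := Mfn_nonpos 0 (by omega)
    omega
  | succ x hx ih =>
    have e1 : Mfn (x + 1 + 1) = tri (x + 2) - Mfn (x + 1) := by
      rw [Mfn_succ (x + 1 + 1) (by omega)]
      rw [show x + 1 + 1 - 1 = x + 1 by ring]
      rw [show x + 1 + 1 = x + 2 by ring]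
    have e2 : Mfn (x + 1) + Mfn x = tri (x + 1) := by
      have := Mfn_add_prev (x + 1) (by omega)
      rw [show x + 1 - 1 = x by ring] at this
      exact this
    have e3 : tri (x + 2) = (x + 2) + tri (x + 1) := by
      rw [tri_succ (x + 2) (by omega)]
      rw [show x + 2 - 1 = x + 1 by ring]
    omega

lemma Mfn_two_step (x : Int) (h : 0 ≤ x) : Mfn (x + 2) = Mfn x + (x + 2) := by
  have e1 : Mfn (x + 2) = tri (x + 2) - Mfn (x + 1) := by
    rw [Mfn_succ (x + 2) (by omega)]
    rw [show x + 2 - 1 = x + 1 by ring]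
  have e2 : Mfn (x + 1) + Mfn x = tri (x + 1) := by
    have := Mfn_add_prev (x + 1) (by omega)
    rw [show x + 1 - 1 = x by ring] at this
    exact this
  have e3 : tri (x + 2) = (x + 2) + tri (x + 1) := by
    rw [tri_succ (x + 2) (by omega)]
    rw [show x + 2 - 1 = x + 1 by ring]
  omega

lemma Mfn_succ_ge (x : Int) : Mfn x ≤ Mfn (x + 1) := by
  by_cases h : 0 ≤ x
  · have := Mfn_step x h; omega
  · rw [Mfn_nonpos x (by omega)]
    exact (Mfn_bounds (x + 1)).1

lemma Mfn_mono (x y : Int) (h : x ≤ y) : Mfn x ≤ Mfn y := by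
  induction y, h using Int.le_induction with
  | base => omega
  | succ y hy ih =>
    have := Mfn_succ_ge y
    omega

lemma tri_add (a : Int) (ha : 0 ≤ a) : ∀ b : Int, 0 ≤ b → tri (a + b) = tri a + a * b + tri b := by
  intro b
  induction b using Int.induction_on with
  | zero => simp [tri_zero_of_nonpos]
  | succ n ih =>
    intro _
    have h1 : tri (a + ((n : Int) + 1)) = (a + (n : Int) + 1) + tri (a + (n : Int)) := by
      rw [show a + ((n : Int) + 1) = (a + (n : Int) + 1) by ring]
      rw [tri_succ (a + (n : Int) + 1) (by omega)]
      rw [show a + (n : Int) + 1 - 1 = a + (n : Int) by ring]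
    have h2 : tri ((n : Int) + 1) = ((n : Int) + 1) + tri (n : Int) := by
      rw [tri_succ ((n : Int) + 1) (by omega)]
      rw [show (n : Int) + 1 - 1 = (n : Int) by ring]
    have h3 := ih (by omega)
    rw [h1, h2, h3]
    ring
  | pred n ih => intro h; omega

-- the two potential functions of the walk
def gLo (j v : Int) : Int := Mfn j + Mfn (j - 1) - Mfn (j - v) + 1
def gHi (j v : Int) : Int := Mfn (j + 1) + Mfn j - Mfn (j + 1 - v)

lemma A1 (j v : Int) (h1 : 1 ≤ v) (h2 : v ≤ j - 1) : tri (v + 1) ≤ gLo j v := by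
  have hx : 1 ≤ j - v := by omega
  have hsum : Mfn j + Mfn (j - 1) = tri j := Mfn_add_prev j (by omega)
  have htrij : tri j = tri (v + 1) + (v + 1) * (j - v - 1) + tri (j - v - 1) := by
    have := tri_add (v + 1) (by omega) (j - v - 1) (by omega)
    rw [show v + 1 + (j - v - 1) = j by ring] at this
    exact this
  have hMx : Mfn (j - v) ≤ tri (j - v) := (Mfn_bounds (j - v)).2
  have htx : tri (j - v) = (j - v) + tri (j - v - 1) := by
    rw [tri_succ (j - v) (by omega)]
  have hprod : 0 ≤ v * (j - v - 1) := mul_nonneg (by omega) (by omega)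
  unfold gLo
  nlinarith
  -- linear in the tri/Mfn atoms given the product fact

lemma T_down (j v : Int) (h2 : 2 ≤ v) (hvj : v ≤ j + 1) :
    gLo (j + 1) (v - 1) ≤ gLo j v + (v - 1) := by
  have hj : 1 ≤ j := by omega
  have hA : Mfn (j + 1) = Mfn (j - 1) + (j + 1) := by
    have := Mfn_two_step (j - 1) (by omega)
    rw [show j - 1 + 2 = j + 1 by ring] at this
    omega
  unfold gLo
  rcases eq_or_lt_of_le hvj with hv | hv
  · -- v = j + 1
    rw [show j + 1 - (v - 1) = j + 2 - v by ring, show j + 2 - v = 1 by omega,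
        show j - v = -1 by omega]
    have hM1 : Mfn 1 = 1 := by
      rw [Mfn_succ 1 (by omega)]
      simp [Mfn_nonpos, tri_succ 1 (by omega), tri_zero_of_nonpos]
    rw [hM1, Mfn_nonpos (-1) (by omega)]
    rw [show j + 1 - 1 = j by ring]
    omega
  · -- v ≤ j
    have hx : 0 ≤ j - v := by omega
    have hB : Mfn (j - v + 2) = Mfn (j - v) + (j - v + 2) := Mfn_two_step (j - v) hx
    rw [show j + 1 - (v - 1) = j - v + 2 by ring, show j + 1 - 1 = j by ring]
    omega

lemma T_upflat (j v a : Int) (h1 : 1 ≤ v) (hvj : v ≤ j + 1) (hj : 0 ≤ j)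
    (hva : v ≤ a) (hav : a ≤ v + 1) (hrule : gLo j v < tri (v + 1)) :
    gLo (j + 1) a ≤ gLo j v + a := by
  by_cases hsmall : v ≤ j - 1
  · exact absurd hrule (not_lt.2 (A1 j v h1 hsmall))
  · have hcase : v = j ∨ v = j + 1 := by omega
    have hM0 : Mfn 0 = 0 := Mfn_nonpos 0 (by omega)
    have hMm1 : Mfn (-1) = 0 := Mfn_nonpos (-1) (by omega)
    rcases hcase with hv | hv
    · -- v = j, hence j ≥ 1
      have hj1 : 1 ≤ j := by omega
      have hA : Mfn (j + 1) = Mfn (j - 1) + (j + 1) := by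
        have := Mfn_two_step (j - 1) (by omega)
        rw [show j - 1 + 2 = j + 1 by ring] at this
        omega
      rcases eq_or_lt_of_le hva with ha | ha
      · -- a = v = j
        unfold gLo
        rw [← ha, hv]
        rw [show j + 1 - j = 1 by ring, show j - j = 0 by ring, show j + 1 - 1 = j by ring]
        rw [Mfn_one, hM0]
        omega
      · -- a = v + 1 = j + 1
        have ha1 : a = j + 1 := by omega
        unfold gLo
        rw [ha1, hv]
        rw [show j + 1 - (j + 1) = 0 by ring, show j - j = 0 by ring,
            show j + 1 - 1 = j by ring]
        rw [hM0]
        omega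
    · -- v = j + 1
      have hA : Mfn (j + 1) ≤ Mfn (j - 1) + (j + 1) := by
        by_cases hj1 : 1 ≤ j
        · have := Mfn_two_step (j - 1) (by omega)
          rw [show j - 1 + 2 = j + 1 by ring] at this
          omega
        · have hj0 : j = 0 := by omega
          rw [hj0]
          norm_num [Mfn_one, Mfn_nonpos (-1) (by omega)]
      rcases eq_or_lt_of_le hva with ha | ha
      · -- a = v = j + 1
        unfold gLo
        rw [← ha, hv]
        rw [show j + 1 - (j + 1) = 0 by ring, show j - (j + 1) = -1 by ring,
            show j + 1 - 1 = j by ring]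
        rw [hM0, hMm1]
        omega
      · -- a = v + 1 = j + 2
        have ha1 : a = j + 2 := by omega
        unfold gLo
        rw [ha1, hv]
        rw [show j + 1 - (j + 2) = -1 by ring, show j - (j + 1) = -1 by ring,
            show j + 1 - 1 = j by ring]
        rw [hMm1]
        omega

lemma T_hi (j v a : Int) (h1 : 1 ≤ v) (hvj : v ≤ j + 1) (hj : 0 ≤ j) (ha1 : 1 ≤ a)
    (hd : v - 1 ≤ a) (hu : a ≤ v + 1) :
    gHi j v + a ≤ gHi (j + 1) a := by
  have hA : Mfn (j + 2) = Mfn j + (j + 2) := Mfn_two_step j hj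
  have hcase : a = v - 1 ∨ a = v ∨ a = v + 1 := by omega
  unfold gHi
  rw [show j + 1 + 1 = j + 2 by ring]
  rcases hcase with ha | ha | ha
  · -- down
    have hv2 : 2 ≤ v := by omega
    have hx : 0 ≤ j + 1 - v := by omega
    have hB : Mfn (j + 1 - v + 2) = Mfn (j + 1 - v) + (j + 1 - v + 2) := Mfn_two_step _ hx
    rw [ha]
    rw [show j + 2 - (v - 1) = j + 1 - v + 2 by ring]
    omega
  · -- flat
    have hx : 0 ≤ j + 1 - v := by omega
    have hB := Mfn_step (j + 1 - v) hx
    rw [ha]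
    rw [show j + 2 - v = (j + 1 - v) + 1 by ring]
    omega
  · -- up
    rw [ha]
    rw [show j + 2 - (v + 1) = j + 1 - v by ring]
    omega

-- suffix-form of the pruning evidence, walked from the head of the reversed list
def SR : Int → Int → List Int → Prop
  | _, _, [] => True
  | q, v, a :: w => (v ≤ a → q < tri (v + 1)) ∧ SR (q + a) a w

lemma RP_imp_SR (dd : Int) : ∀ (r : List Int) (x : Int), RP dd (x :: r) → SR (dd - r.sum) x r := by
  intro r
  induction r with
  | nil => intro x _; trivial
  | cons y r' ih =>
    intro x hrp
    refine ⟨?_, ?_⟩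
    · intro hxy
      have := hrp.1 hxy
      simp only [List.sum_cons] at *
      omega
    · have := ih y hrp.2
      simp only [List.sum_cons]
      rw [show dd - (y + r'.sum) + y = dd - r'.sum by ring]
      exact this

lemma LB_walk : ∀ (w : List Int) (v q j z : Int),
    Steps (v :: w) → Pos (v :: w) → SR q v w →
    1 ≤ v → v ≤ j + 1 → 0 ≤ j → gLo j v ≤ q →
    (v :: w).getLast? = some z → gLo (j + (w.length : Int)) z ≤ q + w.sum := by
  intro w
  induction w with
  | nil =>
    intro v q j z _ _ _ _ _ _ hq hlast
    simp at hlast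
    subst hlast
    simpa using hq
  | cons a w' ih =>
    intro v q j z hsteps hpos hsr h1 hvj hj hq hlast
    have ha1 : 1 ≤ a := hpos a (by simp)
    have hstep : a - 1 ≤ v ∧ v ≤ a + 1 := by
      have := hsteps.1; omega
    have hnext : gLo (j + 1) a ≤ q + a := by
      rcases le_or_gt v a with hva | hva
      · -- flat or up: the pruning rule applies
        have hrule : q < tri (v + 1) := hsr.1 hva
        have := T_upflat j v a h1 hvj hj hva (by omega) (by omega)
        omega
      · -- down step: a = v - 1
        have hav : a = v - 1 := by omega
        subst hav
        have := T_down j v (by omega) hvj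
        omega
    have hlast' : (a :: w').getLast? = some z := by
      rw [← getLast?_cons_ne (x := v) (by simp)]
      exact hlast
    have hrec := ih a (q + a) (j + 1) z hsteps.2
      (fun x hx => hpos x (List.mem_cons_of_mem v hx)) hsr.2
      ha1 (by omega) (by omega) hnext hlast'
    simp only [List.length_cons, List.sum_cons]
    push_cast
    rw [show j + ((w'.length : Int) + 1) = (j + 1) + (w'.length : Int) by ring]
    have : q + (a + w'.sum) = (q + a) + w'.sum := by ring
    omega

lemma UB_walk : ∀ (w : List Int) (v q j z : Int),
    Steps (v :: w) → Pos (v :: w) →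
    1 ≤ v → v ≤ j + 1 → 0 ≤ j → q ≤ gHi j v →
    (v :: w).getLast? = some z → q + w.sum ≤ gHi (j + (w.length : Int)) z := by
  intro w
  induction w with
  | nil =>
    intro v q j z _ _ _ _ _ hq hlast
    simp at hlast
    subst hlast
    simpa using hq
  | cons a w' ih =>
    intro v q j z hsteps hpos h1 hvj hj hq hlast
    have ha1 : 1 ≤ a := hpos a (by simp)
    have hstep : a - 1 ≤ v ∧ v ≤ a + 1 := by
      have := hsteps.1; omega
    have hnext : q + a ≤ gHi (j + 1) a := by
      have := T_hi j v a h1 hvj hj ha1 (by omega) (by omega)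
      omega
    have hlast' : (a :: w').getLast? = some z := by
      rw [← getLast?_cons_ne (x := v) (by simp)]
      exact hlast
    have hrec := ih a (q + a) (j + 1) z hsteps.2
      (fun x hx => hpos x (List.mem_cons_of_mem v hx))
      ha1 (by omega) (by omega) hnext hlast'
    simp only [List.length_cons, List.sum_cons]
    push_cast
    rw [show j + ((w'.length : Int) + 1) = (j + 1) + (w'.length : Int) by ring]
    have : q + (a + w'.sum) = (q + a) + w'.sum := by ring
    omega

-- at a goal state of the loop the length is pinned between the two bounds
lemma goal_bounds (d : Int) (l : List Int) (hinv : InvA d l)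
    (hsum : l.sum = d) (hhead : l.headI = 1) :
    Mfn ((l.length : Int) - 1) < d ∧ d ≤ Mfn (l.length : Int) := by
  obtain ⟨hne, hlast, hpos, hsteps, hrp, hi2⟩ := hinv
  match l, hne with
  | v :: w, _ =>
    simp only [List.headI] at hhead
    subst hhead
    have hsum' : (1 : Int) + w.sum = d := by
      simpa [List.sum_cons] using hsum
    have hsr : SR 1 1 w := by
      have := RP_imp_SR d w 1 hrp
      have hq : d - w.sum = 1 := by omega
      rwa [hq] at this
    have hlb := LB_walk w 1 1 0 1 hsteps hpos hsr (by omega) (by omega) (by omega)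
      (by unfold gLo; rw [Mfn_nonpos 0 (by omega), Mfn_nonpos (0-1) (by omega)]; omega) hlast
    have hub := UB_walk w 1 1 0 1 hsteps hpos (by omega) (by omega) (by omega)
      (by unfold gHi; rw [show (0:Int)+1 = 1 by ring, Mfn_one, Mfn_nonpos 0 (by omega),
            show (1:Int) - 1 = 0 by ring, Mfn_nonpos 0 (by omega)]; omega) hlast
    have hglo : gLo (0 + (w.length : Int)) 1 = Mfn (w.length : Int) + 1 := by
      unfold gLo
      rw [show (0:Int) + (w.length : Int) - 1 = (w.length : Int) - 1 by ring]
      rw [show (0:Int) + (w.length : Int) = (w.length : Int) by ring]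
      ring
    have hghi : gHi (0 + (w.length : Int)) 1 = Mfn ((w.length : Int) + 1) := by
      unfold gHi
      rw [show (0:Int) + (w.length : Int) + 1 - 1 = (w.length : Int) by ring]
      rw [show (0:Int) + (w.length : Int) + 1 = (w.length : Int) + 1 by ring]
      rw [show (0:Int) + (w.length : Int) = (w.length : Int) by ring]
      ring
    rw [hglo] at hlb
    rw [hghi] at hub
    simp only [List.length_cons]
    push_cast
    constructor
    · rw [show (w.length : Int) + 1 - 1 = (w.length : Int) by ring]; omega
    · rw [show (w.length : Int) + 1 = (w.length : Int) + 1 by ring]; omega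

lemma loopAF_correct (d : Int) : ∀ (f : Nat) (l : List Int), InvA d l → meas d l ≤ f →
    Mfn (loopAF d f l - 1) < d ∧ d ≤ Mfn (loopAF d f l) := by
  intro f
  induction f with
  | zero =>
    intro l hinv hm
    have h1 := mu_lt d l hinv
    unfold meas at hm
    omega
  | succ f ih =>
    intro l hinv hm
    rw [loopAF]
    by_cases hg : l.sum = d ∧ l.headI = 1
    · rw [if_pos hg]
      exact goal_bounds d l hinv hg.1 hg.2
    · rw [if_neg hg]
      by_cases hlt : l.sum < d
      · rw [if_pos hlt]
        refine ih _ (inv_append d l hinv hlt) ?_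
        have := meas_append_lt d l hinv hlt
        omega
      · rw [if_neg hlt]
        refine ih _ (inv_popdec d l hinv (by omega) hg) ?_
        have := meas_popdec_lt d l hinv (by omega) hg
        omega

-- B-side: the hand-rolled integer square root
lemma isq_correct (d k : Int) : 1 ≤ k → k * k ≤ d →
    1 ≤ isq d k ∧ (isq d k) * (isq d k) ≤ d ∧ d < (isq d k + 1) * (isq d k + 1) := by
  fun_induction isq d k with
  | case1 k h ih =>
    intro hk1 _
    exact ih (by omega) h
  | case2 k h =>
    intro hk1 hk2
    exact ⟨hk1, hk2, by omega⟩

lemma Mfn_odd (k : Int) (hk : 1 ≤ k) : Mfn (2 * k - 1) = k * k := by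
  induction k, hk using Int.le_induction with
  | base => norm_num [Mfn_one]
  | succ k hk ih =>
    have h1 := Mfn_two_step (2 * k - 1) (by omega)
    rw [show 2 * k - 1 + 2 = 2 * (k + 1) - 1 by ring] at h1
    rw [h1, ih]
    ring

lemma Mfn_even (k : Int) (hk : 0 ≤ k) : Mfn (2 * k) = k * k + k := by
  induction k, hk using Int.le_induction with
  | base => simp [Mfn_nonpos]
  | succ k hk ih =>
    have h1 := Mfn_two_step (2 * k) (by omega)
    rw [show 2 * k + 2 = 2 * (k + 1) by ring] at h1
    rw [h1, ih]
    ring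

lemma alt_bounds (d : Int) (hd : 1 ≤ d) :
    Mfn (min_hop2_alt d - 1) < d ∧ d ≤ Mfn (min_hop2_alt d) := by
  have hd0 : ¬ (d = 0) := by omega
  obtain ⟨hk1, hk2, hk3⟩ := isq_correct d 1 (by omega) (by omega)
  set k := isq d 1 with hk
  have halt : min_hop2_alt d =
      (if d = k * k then 2 * k - 1 else if d ≤ k * k + k then 2 * k else 2 * k + 1) := by
    rw [min_hop2_alt]
    simp only [hd0, if_false, ← hk]
  rw [halt]
  split_ifs with hc1 hc2
  · -- d = k * k, answer 2k - 1
    have e1 : Mfn (2 * k - 1 - 1) = (k - 1) * (k - 1) + (k - 1) := by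
      rw [show 2 * k - 1 - 1 = 2 * (k - 1) by ring]
      exact Mfn_even (k - 1) (by omega)
    have e2 : Mfn (2 * k - 1) = k * k := Mfn_odd k hk1
    constructor
    · rw [e1]; nlinarith
    · rw [e2]; omega
  · -- k² < d ≤ k² + k, answer 2k
    have e1 : Mfn (2 * k - 1) = k * k := Mfn_odd k hk1
    have e2 : Mfn (2 * k) = k * k + k := Mfn_even k (by omega)
    constructor
    · rw [show 2 * k - 1 = 2 * k - 1 by ring] at e1
      rw [show (2 : Int) * k - 1 = 2 * k - 1 by ring]
      rw [e1]
      omega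
    · rw [e2]; omega
  · -- k² + k < d < (k+1)², answer 2k + 1
    have e1 : Mfn (2 * k) = k * k + k := Mfn_even k (by omega)
    have e2 : Mfn (2 * k + 1) = (k + 1) * (k + 1) := by
      have := Mfn_odd (k + 1) (by omega)
      rw [show 2 * (k + 1) - 1 = 2 * k + 1 by ring] at this
      exact this
    constructor
    · rw [show (2 : Int) * k + 1 - 1 = 2 * k by ring, e1]; omega
    · rw [e2]; omega

lemma bounds_uniq (x y dd : Int) (hx1 : Mfn (x - 1) < dd) (hx2 : dd ≤ Mfn x)
    (hy1 : Mfn (y - 1) < dd) (hy2 : dd ≤ Mfn y) : x = y := by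
  rcases lt_trichotomy x y with h | h | h
  · have := Mfn_mono x (y - 1) (by omega); omega
  · exact h
  · have := Mfn_mono y (x - 1) (by omega); omega

theorem min_hop2_spec' : ∀ (distance : Int), Pre_min_hop2 distance → min_hop2 distance = min_hop2_alt distance := by
  intro d hpre
  unfold Pre_min_hop2 at hpre
  by_cases hd0 : d = 0
  · subst hd0
    rw [min_hop2, min_hop2_alt]
    norm_num
  · have hd1 : 1 ≤ d := by omega
    have hA : min_hop2 d = loopAF d (4 ^ (d.toNat + 1)) [1] := by
      rw [min_hop2]
      simp [hd0, hd1]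
    obtain ⟨ha1, ha2⟩ := loopAF_correct d (4 ^ (d.toNat + 1)) [1] (inv_init d hd1)
      (Nat.sub_le _ _)
    obtain ⟨hb1, hb2⟩ := alt_bounds d hd1
    rw [hA]
    exact bounds_uniq _ _ d ha1 ha2 hb1 hb2

-- ===== VERDICT (by name: the statement is the Claim_ definition above) =====
theorem min_hop2_spec : Claim_equal_min_hop2 := by
  intro d _ hpre
  exact min_hop2_spec' d hpre
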